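-- pv_equiv track=rewrite | github.com/tphoran/projecteuler | projecteuler/eighteen_code.py | collect_best_possible_outcomes_from_two_levels
-- ===== SOURCE A (Python) =====
-- def collect_best_possible_outcomes_from_two_levels(level_one, level_two):
--     outcomes = []
--     for n in range(len(level_one)):
--         outcomes.append(level_one[n]+level_two[n])
--         outcomes.append(level_one[n] + level_two[n+1])
--
--     best_outcomes = [outcomes[0],]
--     for o in range(1, len(outcomes)-2, 2):
--         best_outcomes.append(max(outcomes[o], outcomes[o+1]))
--     best_outcomes.append(outcomes[len(outcomes)-1])
--     return best_outcomes
-- ===== SOURCE B (Python) =====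
-- def collect_best_possible_outcomes_from_two_levels(level_one, level_two):
--     n = len(level_one)
--     best = []
--     for i in range(n + 1):
--         if i == 0:
--             parent = level_one[0]
--         elif i == n:
--             parent = level_one[n - 1]
--         else:
--             parent = max(level_one[i - 1], level_one[i])
--         best.append(parent + level_two[i])
--     return best
-- ===== Notes on version B (the rewrite author's own statement) =====
-- stated objective: simpler
-- what changed: B drops A's interleaved doubled 'outcomes' list and its separate index-stepping max pass; it makes one direct pass over output positions, computing each entry's best parent (edge element at the ends, max of the two adjacent parents in the middle) plus the child value.
import Mathlib
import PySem

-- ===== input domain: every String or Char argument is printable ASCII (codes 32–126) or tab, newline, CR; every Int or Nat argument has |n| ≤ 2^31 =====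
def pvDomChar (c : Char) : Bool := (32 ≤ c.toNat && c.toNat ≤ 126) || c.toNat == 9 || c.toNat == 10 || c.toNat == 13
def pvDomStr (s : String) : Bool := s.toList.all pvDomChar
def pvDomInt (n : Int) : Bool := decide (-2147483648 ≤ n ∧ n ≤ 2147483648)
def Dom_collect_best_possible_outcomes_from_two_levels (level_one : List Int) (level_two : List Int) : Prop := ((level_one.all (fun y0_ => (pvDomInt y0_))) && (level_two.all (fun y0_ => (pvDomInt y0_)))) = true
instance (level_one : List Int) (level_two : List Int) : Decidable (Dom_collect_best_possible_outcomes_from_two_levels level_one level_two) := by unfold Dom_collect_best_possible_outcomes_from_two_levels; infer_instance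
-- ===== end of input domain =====

-- B replaces A's interleaved doubled 'outcomes' list and second stepping pass by one
-- direct pass over output positions (objective: simpler).

-- ===== PORT A =====
def collect_best_possible_outcomes_from_two_levels (level_one : List Int) (level_two : List Int) : List Int :=
  let outcomes := (PySem.List.pyRange 0 (level_one.length : Int) 1).foldl
    (fun acc n => acc ++ [PySem.List.pyGetD level_one n 0 + PySem.List.pyGetD level_two n 0,
                          PySem.List.pyGetD level_one n 0 + PySem.List.pyGetD level_two (n + 1) 0]) []
  let best_outcomes := [PySem.List.pyGetD outcomes 0 0]
  let best_outcomes := (PySem.List.pyRange 1 ((outcomes.length : Int) - 2) 2).foldl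
    (fun acc o => acc ++ [max (PySem.List.pyGetD outcomes o 0) (PySem.List.pyGetD outcomes (o + 1) 0)]) best_outcomes
  best_outcomes ++ [PySem.List.pyGetD outcomes ((outcomes.length : Int) - 1) 0]

-- ===== PORT B =====
def collect_best_possible_outcomes_from_two_levels_alt (level_one : List Int) (level_two : List Int) : List Int :=
  let n : Int := (level_one.length : Int)
  (PySem.List.pyRange 0 (n + 1) 1).foldl
    (fun acc i =>
      let parent :=
        if i = 0 then PySem.List.pyGetD level_one 0 0
        else if i = n then PySem.List.pyGetD level_one (n - 1) 0
        else max (PySem.List.pyGetD level_one (i - 1) 0) (PySem.List.pyGetD level_one i 0)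
      acc ++ [parent + PySem.List.pyGetD level_two i 0]) []

-- ===== PRECONDITION & SPEC =====
-- A raises IndexError when level_one is empty (outcomes[0]) or level_two is shorter than
-- len(level_one)+1 (level_two[n+1]); exactly those inputs are excluded.
def Pre_collect_best_possible_outcomes_from_two_levels (level_one : List Int) (level_two : List Int) : Prop :=
  level_one ≠ [] ∧ level_one.length + 1 ≤ level_two.length
instance (level_one : List Int) (level_two : List Int) : Decidable (Pre_collect_best_possible_outcomes_from_two_levels level_one level_two) := by unfold Pre_collect_best_possible_outcomes_from_two_levels; infer_instance

def pvWitness_collect_best_possible_outcomes_from_two_levels : List Int × List Int := ([1, 2], [3, 4, 5])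

def Spec_collect_best_possible_outcomes_from_two_levels (level_one : List Int) (level_two : List Int) (out : List Int) : Prop := out = collect_best_possible_outcomes_from_two_levels_alt level_one level_two
instance (level_one : List Int) (level_two : List Int) (out : List Int) : Decidable (Spec_collect_best_possible_outcomes_from_two_levels level_one level_two out) := by unfold Spec_collect_best_possible_outcomes_from_two_levels; infer_instance

-- ===== CLAIM (what is proved, stated in full; the proofs are below) =====
def Claim_equal_collect_best_possible_outcomes_from_two_levels : Prop := ∀ (level_one : List Int) (level_two : List Int), Dom_collect_best_possible_outcomes_from_two_levels level_one level_two → Pre_collect_best_possible_outcomes_from_two_levels level_one level_two → Spec_collect_best_possible_outcomes_from_two_levels level_one level_two (collect_best_possible_outcomes_from_two_levels level_one level_two)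

-- ===== LEMMAS AND PROOFS =====

-- length of the interleaved list built by A's first loop
lemma interleave_length (f g : ℕ → Int) (n : ℕ) :
    ((List.range n).flatMap (fun j => [f j, g j])).length = 2 * n := by
  induction n with
  | zero => simp
  | succ m ih => simp [List.range_succ, ih]; omega

-- values of the interleaved list at even and odd indices
lemma interleave_getD (f g : ℕ → Int) (n k : ℕ) (hk : k < n) :
    ((List.range n).flatMap (fun j => [f j, g j])).getD (2 * k) 0 = f k ∧
    ((List.range n).flatMap (fun j => [f j, g j])).getD (2 * k + 1) 0 = g k := by
  induction n with
  | zero => omega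
  | succ m ih =>
    rw [List.range_succ, List.flatMap_append]
    rcases Nat.lt_or_ge k m with h | h
    · have hlen := interleave_length f g m
      have h1 : 2 * k < ((List.range m).flatMap (fun j => [f j, g j])).length := by omega
      have h2 : 2 * k + 1 < ((List.range m).flatMap (fun j => [f j, g j])).length := by omega
      constructor
      · rw [List.getD_eq_getElem?_getD, List.getElem?_append_left h1,
            ← List.getD_eq_getElem?_getD]
        exact (ih h).1
      · rw [List.getD_eq_getElem?_getD, List.getElem?_append_left h2,
            ← List.getD_eq_getElem?_getD]
        exact (ih h).2
    · have hkm : k = m := by omega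
      subst hkm
      have hlen := interleave_length f g k
      constructor
      · rw [List.getD_eq_getElem?_getD, List.getElem?_append_right (by omega)]
        simp [hlen]
      · rw [List.getD_eq_getElem?_getD, List.getElem?_append_right (by omega)]
        simp [hlen]

-- A's result written as first element ++ middle maxima ++ last element
lemma portA_decomp (l1 l2 : List Int) (h1 : l1 ≠ []) (_h2 : l1.length + 1 ≤ l2.length) :
    collect_best_possible_outcomes_from_two_levels l1 l2 =
      [l1.getD 0 0 + l2.getD 0 0] ++
      (List.range (l1.length - 1)).map
        (fun k => max (l1.getD k 0 + l2.getD (k + 1) 0) (l1.getD (k + 1) 0 + l2.getD (k + 1) 0)) ++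
      [l1.getD (l1.length - 1) 0 + l2.getD l1.length 0] := by
  have hn : 1 ≤ l1.length := List.length_pos_iff.mpr h1
  simp only [collect_best_possible_outcomes_from_two_levels]
  have houtcomes : (PySem.List.pyRange 0 (l1.length : Int) 1).foldl
      (fun acc n => acc ++ [PySem.List.pyGetD l1 n 0 + PySem.List.pyGetD l2 n 0,
                            PySem.List.pyGetD l1 n 0 + PySem.List.pyGetD l2 (n + 1) 0]) [] =
      (List.range l1.length).flatMap
        (fun k => [l1.getD k 0 + l2.getD k 0, l1.getD k 0 + l2.getD (k + 1) 0]) := by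
    rw [PySem.List.pyRange_one, PySem.List.foldl_append_eq_flatMap, List.flatMap_map,
      List.nil_append]
    have ht : ((l1.length : Int) - 0).toNat = l1.length := by omega
    rw [ht]
    congr 1
    funext k
    have e2 : ((0:Int) + ↑k) = ((k : ℕ) : Int) := by ring
    have e3 : ((0:Int) + ↑k + 1) = ((k + 1 : ℕ) : Int) := by push_cast; ring
    rw [e3, e2, PySem.List.pyGetD_natCast, PySem.List.pyGetD_natCast, PySem.List.pyGetD_natCast]
  rw [houtcomes]
  set F : ℕ → Int := fun k => l1.getD k 0 + l2.getD k 0 with hF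
  set G : ℕ → Int := fun k => l1.getD k 0 + l2.getD (k + 1) 0 with hG
  have hFG : (List.range l1.length).flatMap
      (fun k => [l1.getD k 0 + l2.getD k 0, l1.getD k 0 + l2.getD (k + 1) 0]) =
      (List.range l1.length).flatMap (fun k => [F k, G k]) := rfl
  rw [hFG]
  have hlen : ((List.range l1.length).flatMap (fun k => [F k, G k])).length = 2 * l1.length :=
    interleave_length F G l1.length
  rw [hlen]
  rw [PySem.List.pyRange_of_pos 1 ((2 * l1.length : ℕ) - 2) (by norm_num),
    PySem.List.foldl_append_singleton_eq_map, List.map_map]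
  have hc : (if (1:Int) < ↑(2 * l1.length) - 2 then
      ((↑(2 * l1.length) - 2 - 1 + 2 - 1 : Int) / 2).toNat else 0) = l1.length - 1 := by
    split_ifs with h <;> omega
  rw [hc]
  simp only [List.cons_append, List.nil_append]
  congr 1
  · -- first element
    rw [PySem.List.pyGetD_zero]
    have := (interleave_getD F G l1.length 0 (by omega)).1
    simpa using this
  congr 1
  · -- middle elements
    apply List.map_congr_left
    intro k hk
    have hk' : k < l1.length - 1 := List.mem_range.mp hk
    simp only [Function.comp_apply]
    have e1 : ((1:Int) + 2 * ↑k) = ((2 * k + 1 : ℕ) : Int) := by push_cast; ring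
    have e2 : ((1:Int) + 2 * ↑k + 1) = ((2 * (k + 1) : ℕ) : Int) := by push_cast; ring
    rw [e2, e1, PySem.List.pyGetD_natCast, PySem.List.pyGetD_natCast]
    rw [(interleave_getD F G l1.length k (by omega)).2,
      (interleave_getD F G l1.length (k + 1) (by omega)).1]
  · -- last element
    have e1 : ((2 * l1.length : ℕ) : Int) - 1 = ((2 * (l1.length - 1) + 1 : ℕ) : Int) := by
      push_cast; omega
    rw [e1, PySem.List.pyGetD_natCast,
      (interleave_getD F G l1.length (l1.length - 1) (by omega)).2]
    rw [hG]
    simp only []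
    rw [Nat.sub_add_cancel hn]

-- B's result written the same way
lemma portB_decomp (l1 l2 : List Int) (h1 : l1 ≠ []) (_h2 : l1.length + 1 ≤ l2.length) :
    collect_best_possible_outcomes_from_two_levels_alt l1 l2 =
      [l1.getD 0 0 + l2.getD 0 0] ++
      (List.range (l1.length - 1)).map
        (fun k => max (l1.getD k 0) (l1.getD (k + 1) 0) + l2.getD (k + 1) 0) ++
      [l1.getD (l1.length - 1) 0 + l2.getD l1.length 0] := by
  have hn : 1 ≤ l1.length := List.length_pos_iff.mpr h1
  simp only [collect_best_possible_outcomes_from_two_levels_alt]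
  rw [PySem.List.pyRange_one, PySem.List.foldl_append_singleton_eq_map, List.map_map]
  have htn : ((l1.length : Int) + 1 - 0).toNat = l1.length + 1 := by omega
  rw [htn]
  have hsplit : List.range (l1.length + 1) =
      0 :: (List.range (l1.length - 1)).map Nat.succ ++ [l1.length] := by
    rw [List.range_succ]
    congr 1
    conv_lhs => rw [← Nat.sub_add_cancel hn, List.range_succ_eq_map]
  rw [hsplit]
  simp only [List.map_append, List.map_cons, List.map_map, List.map_nil, List.nil_append,
    List.cons_append, Function.comp]
  congr 1
  · -- first element
    norm_num [PySem.List.pyGetD_zero]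
  congr 1
  · -- middle elements
    apply List.map_congr_left
    intro k hk
    have hk' : k < l1.length - 1 := List.mem_range.mp hk
    simp only [Function.comp_apply]
    have h0 : ((0:Int) + ↑(Nat.succ k)) ≠ 0 := by push_cast; omega
    have hN : ((0:Int) + ↑(Nat.succ k)) ≠ (l1.length : Int) := by push_cast; omega
    rw [if_neg h0, if_neg hN]
    have e1 : ((0:Int) + ↑(Nat.succ k)) - 1 = (k : Int) := by push_cast; ring
    have e2 : ((0:Int) + ↑(Nat.succ k)) = ((k + 1 : ℕ) : Int) := by push_cast; ring
    rw [e1, e2, PySem.List.pyGetD_natCast, PySem.List.pyGetD_natCast, PySem.List.pyGetD_natCast]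
  · -- last element
    have h0 : ((0:Int) + (l1.length : Int)) ≠ 0 := by omega
    rw [if_neg h0, if_pos (by ring)]
    have e1 : ((l1.length : Int)) - 1 = ((l1.length - 1 : ℕ) : Int) := by omega
    have e2 : ((0:Int) + (l1.length : Int)) = ((l1.length : ℕ) : Int) := by ring
    rw [e1, e2, PySem.List.pyGetD_natCast, PySem.List.pyGetD_natCast]

-- ===== VERDICT (by name: the statement is the Claim_ definition above) =====
theorem collect_best_possible_outcomes_from_two_levels_spec : Claim_equal_collect_best_possible_outcomes_from_two_levels := by
  intro l1 l2 _ hpre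
  obtain ⟨h1, h2⟩ := hpre
  unfold Spec_collect_best_possible_outcomes_from_two_levels
  rw [portA_decomp l1 l2 h1 h2, portB_decomp l1 l2 h1 h2]
  congr 2
  apply List.map_congr_left
  intro k _
  rw [max_add_add_right]
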